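-- pv_equiv track=rewrite | github.com/mateusvgg/huffman_compression | utils/bitstuff.py | _gen_header
-- ===== SOURCE A (Python) =====
-- def _gen_header(codes):
--     ''' Generate the header information that carries
--     the possible symbols and the corresponding codes. '''
--
--     header1 = ''                                                         # List with 0's and 1's, every position that has an 1 is a possible symbol
--     header2 = ''                                                         # List with the code size in 8 bits followed by the code
--
--     bytes_dict = {i : str(bin(i))[2:].zfill(8) for i in range(256)}
--     possible_symbols = list(bytes_dict.values())                         # Every symbol between 00000000 and 11111111
--     actual_symbols = codes.keys()                                        # Only the symbols in the source
--
--     for symbol in possible_symbols: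
--           if symbol in actual_symbols:
--               code = codes[symbol]
--               binary_code_length = bytes_dict[len(code)]
--               header1 += '1'
--               header2 = header2 + binary_code_length + code
--           else:
--               header1 += '0'
--
--     return header1 + header2
-- ===== SOURCE B (Python) =====
-- def _gen_header(codes):
--     ''' Same header: 256-bit presence bitmap followed by (8-bit length, code)
--     fields in ascending symbol order, built by scattering over the dict's items
--     into two 256-slot tables instead of scanning all 256 possible symbols. '''
--     bits = ['0'] * 256
--     fields = [''] * 256
--     for symbol, code in codes.items():
--         if len(symbol) == 8 and all(c in '01' for c in symbol):
--             i = int(symbol, 2)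
--             bits[i] = '1'
--             fields[i] = format(len(code), '08b') + code
--     return ''.join(bits) + ''.join(fields)
-- ===== Notes on version B (the rewrite author's own statement) =====
-- stated objective: alternative
-- what changed: B scatters the dict's items into two 256-slot tables (presence bit and length+code field) indexed by int(symbol, 2) and joins them, instead of A's gather loop over all 256 possible symbols with a precomputed byte dict and per-symbol membership tests.
import Mathlib
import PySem

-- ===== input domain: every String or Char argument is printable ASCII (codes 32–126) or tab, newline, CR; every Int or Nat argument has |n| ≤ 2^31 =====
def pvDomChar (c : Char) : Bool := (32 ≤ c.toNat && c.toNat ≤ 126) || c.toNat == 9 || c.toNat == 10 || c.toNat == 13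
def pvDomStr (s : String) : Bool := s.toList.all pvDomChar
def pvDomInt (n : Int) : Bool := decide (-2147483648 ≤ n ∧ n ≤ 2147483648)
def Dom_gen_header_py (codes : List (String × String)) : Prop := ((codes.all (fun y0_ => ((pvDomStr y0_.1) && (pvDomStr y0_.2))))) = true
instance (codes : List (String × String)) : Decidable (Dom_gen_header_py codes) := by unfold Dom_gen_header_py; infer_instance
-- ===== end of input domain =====

-- B builds the header by scattering the dict's items into two 256-slot tables indexed
-- by int(symbol, 2) instead of A's gather loop over all 256 possible symbols (alternative
-- decomposition; return-value equivalence proved on Pre_).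

-- ===== PORT A =====
-- str(bin(n))[2:]: binary digits of n, via a structural fuel counter (n halves each step, so fuel n suffices)
def pvBinCore : Nat → Nat → List Char
  | _, 0 => []
  | 0, _+1 => []
  | f+1, n+1 => pvBinCore f ((n+1) / 2) ++ [if (n+1) % 2 = 1 then '1' else '0']
def pvBinStr (n : Nat) : List Char := if n = 0 then ['0'] else pvBinCore n n

def gen_header_py (codes : List (String × String)) : String :=
  -- the dict `codes`, with its strings handled on the List Char side
  let d : PySem.Dict (List Char) (List Char) :=
    PySem.Dict.mk (codes.map (fun p => (p.1.toList, p.2.toList)))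
  -- bytes_dict = {i : str(bin(i))[2:].zfill(8) for i in range(256)}
  let bytes_dict : PySem.Dict Int (List Char) :=
    (PySem.List.pyRange 0 256 1).foldl
      (fun bd i => bd.insert i (PySem.Chars.zfill (pvBinStr i.toNat) 8)) PySem.Dict.empty
  let possible_symbols := bytes_dict.values
  let actual_symbols := d.keys
  let h := possible_symbols.foldl
    (fun (h : List Char × List Char) symbol =>
      if symbol ∈ actual_symbols then
        (h.1 ++ ['1'],
         -- code = codes[symbol] (present by the guard); bytes_dict[len(code)]: the
         -- KeyError for len(code) ≥ 256 is excluded by Pre_, so getD is exact here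
         h.2 ++ bytes_dict.getD (((d.getD symbol []).length : Int)) [] ++ d.getD symbol [])
      else (h.1 ++ ['0'], h.2))
    ([], [])
  String.ofList (h.1 ++ h.2)

-- ===== PORT B =====
def pvIsBit (c : Char) : Bool := c == '0' || c == '1'

def gen_header_py_alt (codes : List (String × String)) : String :=
  let st := codes.foldl
    (fun (st : List (List Char) × List (List Char)) p =>
      let k := p.1.toList
      if k.length == 8 && k.all pvIsBit then
        let i := ((PySem.Int.ofCharsBase? k 2).getD 0).toNat   -- int(symbol, 2); some, by the guard
        let field := PySem.Chars.zfill (pvBinStr p.2.toList.length) 8 ++ p.2.toList  -- format(len(code),'08b') + code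
        (st.1.set i ['1'], st.2.set i field)
      else st)
    (List.replicate 256 ['0'], List.replicate 256 ([] : List Char))
  String.ofList (st.1.flatten ++ st.2.flatten)

-- ===== PRECONDITION & SPEC =====
-- Pre_ excludes (a) association lists with duplicate keys — no Python dict input corresponds
-- to them (a dict cannot hold duplicate keys), so first-match vs last-write behaviour there
-- is accidental — and (b) inputs where a present 8-bit symbol maps to a code longer than 255
-- characters, on which A raises KeyError at bytes_dict[len(code)].
def Pre_gen_header_py (codes : List (String × String)) : Prop :=
  (codes.map Prod.fst).Nodup ∧
  ∀ p ∈ codes, (p.1.toList.length = 8 ∧ ∀ c ∈ p.1.toList, c = '0' ∨ c = '1') →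
    p.2.toList.length ≤ 255
instance (codes : List (String × String)) : Decidable (Pre_gen_header_py codes) := by
  unfold Pre_gen_header_py; infer_instance

def pvWitness_gen_header_py : (List (String × String)) :=
  [("01", "0"), ("x", "1")]

def Spec_gen_header_py (codes : List (String × String)) (out : String) : Prop := out = gen_header_py_alt codes
instance (codes : List (String × String)) (out : String) : Decidable (Spec_gen_header_py codes out) := by unfold Spec_gen_header_py; infer_instance

-- ===== CLAIM (what is proved, stated in full; the proofs are below) =====
def Claim_equal_gen_header_py : Prop := ∀ (codes : List (String × String)), Dom_gen_header_py codes → Pre_gen_header_py codes → Spec_gen_header_py codes (gen_header_py codes)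

-- ===== LEMMAS AND PROOFS =====

-- the 8-bit symbol of n (format(n, '08b')) and the value of an 8-bit symbol
def pvSym (n : Nat) : List Char := PySem.Chars.zfill (pvBinStr n) 8
def pvParse (k : List Char) : Nat := ((PySem.Int.ofCharsBase? k 2).getD 0).toNat

-- the two dict values A precomputes, and B's loop step, as named terms of the ports' bodies
def pvD (codes : List (String × String)) : PySem.Dict (List Char) (List Char) :=
  PySem.Dict.mk (codes.map (fun p => (p.1.toList, p.2.toList)))
def pvBytes : PySem.Dict Int (List Char) :=
  (PySem.List.pyRange 0 256 1).foldl
    (fun bd i => bd.insert i (PySem.Chars.zfill (pvBinStr i.toNat) 8)) PySem.Dict.empty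
def pvStepB (st : List (List Char) × List (List Char)) (p : String × String) :
    List (List Char) × List (List Char) :=
  let k := p.1.toList
  if k.length == 8 && k.all pvIsBit then
    let i := ((PySem.Int.ofCharsBase? k 2).getD 0).toNat
    let field := PySem.Chars.zfill (pvBinStr p.2.toList.length) 8 ++ p.2.toList
    (st.1.set i ['1'], st.2.set i field)
  else st

lemma pvA_eq (codes : List (String × String)) :
    gen_header_py codes = String.ofList
      (let h := pvBytes.values.foldl
        (fun (h : List Char × List Char) s =>
          if s ∈ (pvD codes).keys then
            (h.1 ++ ['1'],
             h.2 ++ pvBytes.getD ((((pvD codes).getD s []).length : Int)) [] ++ (pvD codes).getD s [])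
          else (h.1 ++ ['0'], h.2)) ([], []);
       h.1 ++ h.2) := rfl

lemma pvB_eq (codes : List (String × String)) :
    gen_header_py_alt codes = String.ofList
      ((codes.foldl pvStepB (List.replicate 256 ['0'], List.replicate 256 [])).1.flatten ++
       (codes.foldl pvStepB (List.replicate 256 ['0'], List.replicate 256 [])).2.flatten) := rfl

set_option maxRecDepth 10000 in
lemma pvSym_specB : ((List.range 256).all (fun i =>
    (pvSym i).length == 8 && (pvSym i).all pvIsBit && (pvParse (pvSym i) == i))) = true := by decide

lemma pvSym_spec (i : Nat) (h : i < 256) :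
    (pvSym i).length = 8 ∧ (∀ c ∈ pvSym i, c = '0' ∨ c = '1') ∧ pvParse (pvSym i) = i := by
  have := pvSym_specB
  simp only [List.all_eq_true, List.mem_range, Bool.and_eq_true, beq_iff_eq, pvIsBit,
    Bool.or_eq_true] at this
  exact ⟨(this i h).1.1, (this i h).1.2, (this i h).2⟩

set_option maxRecDepth 10000 in
lemma pvParse_sym (k : List Char) (h8 : k.length = 8) (hb : ∀ c ∈ k, c = '0' ∨ c = '1') :
    pvSym (pvParse k) = k ∧ pvParse k < 256 := by
  rcases k with _ | ⟨c1, _ | ⟨c2, _ | ⟨c3, _ | ⟨c4, _ | ⟨c5, _ | ⟨c6, _ | ⟨c7, _ | ⟨c8, _ | ⟨c9, k⟩⟩⟩⟩⟩⟩⟩⟩⟩ <;>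
    simp only [List.length] at h8 <;> try omega
  have h1 := hb c1 (by simp); have h2 := hb c2 (by simp); have h3 := hb c3 (by simp)
  have h4 := hb c4 (by simp); have h5 := hb c5 (by simp); have h6 := hb c6 (by simp)
  have h7 := hb c7 (by simp); have h8' := hb c8 (by simp)
  rcases h1 with rfl | rfl <;> rcases h2 with rfl | rfl <;> rcases h3 with rfl | rfl <;>
    rcases h4 with rfl | rfl <;> rcases h5 with rfl | rfl <;> rcases h6 with rfl | rfl <;>
    rcases h7 with rfl | rfl <;> rcases h8' with rfl | rfl <;> decide

lemma pvGuard (k : List Char) :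
    (k.length == 8 && k.all pvIsBit) = true ↔ (k.length = 8 ∧ ∀ c ∈ k, c = '0' ∨ c = '1') := by
  simp [pvIsBit, List.all_eq_true]

-- ===== characterisation of A's precomputed bytes_dict =====

lemma pvBytes_items :
    pvBytes.items = (PySem.List.pyRange 0 256 1).map
      (fun i => (i, PySem.Chars.zfill (pvBinStr i.toNat) 8)) := by
  have h := PySem.Dict.items_foldl_insert_fresh (PySem.List.pyRange 0 256 1)
    (fun i => i) (fun i => PySem.Chars.zfill (pvBinStr i.toNat) 8) PySem.Dict.empty
    (by simp) (by simpa using PySem.List.nodup_pyRange_one 0 256)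
  simpa [pvBytes] using h

lemma pvBytes_values : pvBytes.values = (List.range 256).map pvSym := by
  simp only [PySem.Dict.values]
  rw [pvBytes_items, PySem.List.pyRange_one]
  simp [List.map_map, Function.comp, pvSym]

lemma pvBytes_keys_nodup : pvBytes.keys.Nodup := by
  simp only [PySem.Dict.keys]
  rw [pvBytes_items, List.map_map]
  exact List.Nodup.map (fun a b h => h) (PySem.List.nodup_pyRange_one 0 256)

lemma pvBytes_getD (n : Nat) (h : n < 256) : pvBytes.getD ((n : Int)) [] = pvSym n := by
  apply PySem.Dict.getD_of_mem_items _ _ pvBytes_keys_nodup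
  rw [pvBytes_items]
  refine List.mem_map.mpr ⟨(n : Int), ?_, by simp [pvSym]⟩
  rw [PySem.List.mem_pyRange_one]
  constructor <;> [positivity; exact_mod_cast h]

-- ===== the gather loop of A as two flattened maps =====

lemma pvFoldA (act : List (List Char)) (g1 g2 : List Char → List Char) (l : List (List Char)) :
    ∀ a1 a2 : List Char,
      l.foldl (fun (h : List Char × List Char) s =>
          if s ∈ act then (h.1 ++ ['1'], h.2 ++ g1 s ++ g2 s) else (h.1 ++ ['0'], h.2)) (a1, a2)
      = (a1 ++ (l.map fun s => if s ∈ act then ['1'] else ['0']).flatten,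
         a2 ++ (l.map fun s => if s ∈ act then g1 s ++ g2 s else []).flatten) := by
  induction l with
  | nil => simp
  | cons s l ih =>
    intro a1 a2
    simp only [List.foldl_cons, List.map_cons, List.flatten_cons]
    by_cases hs : s ∈ act <;> simp only [hs, if_true, if_false] <;>
      rw [ih] <;> simp [List.append_assoc]

-- ===== the scatter loop of B, slot by slot =====

-- an entry that writes slot i
def pvHit (p : String × String) (i : Nat) : Prop :=
  p.1.toList.length = 8 ∧ (∀ c ∈ p.1.toList, c = '0' ∨ c = '1') ∧ pvParse p.1.toList = i

-- the (8-bit length ++ code) field an entry contributes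
def pvField (p : String × String) : List Char :=
  PySem.Chars.zfill (pvBinStr p.2.toList.length) 8 ++ p.2.toList

lemma pvStepB_pos (st : List (List Char) × List (List Char)) (p : String × String)
    (hg : (p.1.toList.length == 8 && p.1.toList.all pvIsBit) = true) :
    pvStepB st p = (st.1.set (pvParse p.1.toList) ['1'], st.2.set (pvParse p.1.toList) (pvField p)) := by
  unfold pvStepB
  rw [if_pos hg]
  rfl

lemma pvStepB_neg (st : List (List Char) × List (List Char)) (p : String × String)
    (hg : ¬ (p.1.toList.length == 8 && p.1.toList.all pvIsBit) = true) :
    pvStepB st p = st := by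
  unfold pvStepB
  rw [if_neg hg]

lemma pvFoldB_miss (es : List (String × String)) (i : Nat)
    (h : ∀ p ∈ es, ¬ pvHit p i) :
    ∀ a1 a2 : List (List Char),
      (es.foldl pvStepB (a1, a2)).1[i]? = a1[i]? ∧ (es.foldl pvStepB (a1, a2)).2[i]? = a2[i]? := by
  induction es with
  | nil => simp
  | cons p es ih =>
    intro a1 a2
    have htail : ∀ q ∈ es, ¬ pvHit q i := fun q hq => h q (List.mem_cons_of_mem _ hq)
    rw [List.foldl_cons]
    by_cases hg : (p.1.toList.length == 8 && p.1.toList.all pvIsBit) = true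
    · rw [pvStepB_pos _ _ hg]
      obtain ⟨h8, hb⟩ := (pvGuard _).mp hg
      have hne : pvParse p.1.toList ≠ i := by
        intro heq
        exact h p List.mem_cons_self ⟨h8, hb, heq⟩
      have hr := ih htail (a1.set (pvParse p.1.toList) ['1']) (a2.set (pvParse p.1.toList) (pvField p))
      rw [hr.1, hr.2, List.getElem?_set_ne hne, List.getElem?_set_ne hne]
      exact ⟨rfl, rfl⟩
    · rw [pvStepB_neg _ _ hg]
      exact ih htail a1 a2

lemma pvFoldB_len (es : List (String × String)) :
    ∀ a1 a2 : List (List Char),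
      (es.foldl pvStepB (a1, a2)).1.length = a1.length ∧
      (es.foldl pvStepB (a1, a2)).2.length = a2.length := by
  induction es with
  | nil => simp
  | cons p es ih =>
    intro a1 a2
    rw [List.foldl_cons]
    by_cases hg : (p.1.toList.length == 8 && p.1.toList.all pvIsBit) = true
    · rw [pvStepB_pos _ _ hg]
      simpa using ih (a1.set (pvParse p.1.toList) ['1']) (a2.set (pvParse p.1.toList) (pvField p))
    · rw [pvStepB_neg _ _ hg]
      exact ih a1 a2

lemma pvFoldB_hit (es : List (String × String)) (k v : String)
    (hmem : (k, v) ∈ es) (hnd : (es.map (fun p => p.1.toList)).Nodup)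
    (h8 : k.toList.length = 8) (hb : ∀ c ∈ k.toList, c = '0' ∨ c = '1') :
    ∀ a1 a2 : List (List Char), a1.length = 256 → a2.length = 256 →
      (es.foldl pvStepB (a1, a2)).1[pvParse k.toList]? = some ['1'] ∧
      (es.foldl pvStepB (a1, a2)).2[pvParse k.toList]? =
        some (pvSym v.toList.length ++ v.toList) := by
  induction es with
  | nil => cases hmem
  | cons p es ih =>
    intro a1 a2 hl1 hl2
    rcases List.mem_cons.mp hmem with heq | hmem'
    · subst heq
      have hg : (k.toList.length == 8 && k.toList.all pvIsBit) = true := (pvGuard _).mpr ⟨h8, hb⟩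
      rw [List.foldl_cons, pvStepB_pos _ _ hg]
      have hlt : pvParse k.toList < 256 := (pvParse_sym _ h8 hb).2
      have hmiss : ∀ q ∈ es, ¬ pvHit q (pvParse k.toList) := by
        intro q hq hqh
        obtain ⟨q8, qb, qp⟩ := hqh
        have hq1 : q.1.toList = pvSym (pvParse k.toList) := by
          rw [← qp]; exact (pvParse_sym _ q8 qb).1.symm
        have hk1 : k.toList = pvSym (pvParse k.toList) := (pvParse_sym _ h8 hb).1.symm
        have hqk : q.1.toList = k.toList := hq1.trans hk1.symm
        have : k.toList ∈ es.map (fun p => p.1.toList) :=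
          List.mem_map.mpr ⟨q, hq, hqk⟩
        exact (List.nodup_cons.mp hnd).1 this
      have hres := pvFoldB_miss es (pvParse k.toList) hmiss
        (a1.set (pvParse k.toList) ['1']) (a2.set (pvParse k.toList) (pvField (k, v)))
      refine ⟨?_, ?_⟩
      · rw [hres.1, List.getElem?_set_self (by omega)]
      · rw [hres.2, List.getElem?_set_self (by omega)]
        rfl
    · rw [List.foldl_cons]
      by_cases hg : (p.1.toList.length == 8 && p.1.toList.all pvIsBit) = true
      · rw [pvStepB_pos _ _ hg]
        exact ih hmem' (List.nodup_cons.mp hnd).2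
          (a1.set (pvParse p.1.toList) ['1']) (a2.set (pvParse p.1.toList) (pvField p))
          (by simpa using hl1) (by simpa using hl2)
      · rw [pvStepB_neg _ _ hg]
        exact ih hmem' (List.nodup_cons.mp hnd).2 a1 a2 hl1 hl2

-- B's tables, slot by slot, are exactly the 256 entries A's gather loop produces
lemma pvTables (codes : List (String × String))
    (hnd : (codes.map Prod.fst).Nodup)
    (hlen : ∀ p ∈ codes, (p.1.toList.length = 8 ∧ ∀ c ∈ p.1.toList, c = '0' ∨ c = '1') →
      p.2.toList.length ≤ 255) :
    (codes.foldl pvStepB (List.replicate 256 ['0'], List.replicate 256 [])).1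
      = (List.range 256).map (fun j => if pvSym j ∈ (pvD codes).keys then ['1'] else ['0']) ∧
    (codes.foldl pvStepB (List.replicate 256 ['0'], List.replicate 256 [])).2
      = (List.range 256).map (fun j =>
          if pvSym j ∈ (pvD codes).keys then
            pvBytes.getD ((((pvD codes).getD (pvSym j) []).length : Int)) []
              ++ (pvD codes).getD (pvSym j) []
          else []) := by
  have hndL : (codes.map (fun p => p.1.toList)).Nodup := by
    have : codes.map (fun p => p.1.toList) = (codes.map Prod.fst).map String.toList := by
      simp [List.map_map]
    rw [this]
    exact hnd.map (fun a b h => String.toList_inj.mp h)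
  have hkeys : (pvD codes).keys = codes.map (fun p => p.1.toList) := by
    simp [pvD, PySem.Dict.keys, List.map_map]
  have hitems : (pvD codes).items = codes.map (fun p => (p.1.toList, p.2.toList)) := rfl
  have hndK : (pvD codes).keys.Nodup := by rw [hkeys]; exact hndL
  have main : ∀ i : Nat,
      (codes.foldl pvStepB (List.replicate 256 ['0'], List.replicate 256 [])).1[i]?
        = ((List.range 256).map (fun j => if pvSym j ∈ (pvD codes).keys then ['1'] else ['0']))[i]? ∧
      (codes.foldl pvStepB (List.replicate 256 ['0'], List.replicate 256 [])).2[i]?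
        = ((List.range 256).map (fun j =>
            if pvSym j ∈ (pvD codes).keys then
              pvBytes.getD ((((pvD codes).getD (pvSym j) []).length : Int)) []
                ++ (pvD codes).getD (pvSym j) []
            else []))[i]? := by
    intro i
    by_cases hi : i < 256
    · have hrhs1 : ((List.range 256).map (fun j => if pvSym j ∈ (pvD codes).keys then ['1'] else ['0']))[i]?
          = some (if pvSym i ∈ (pvD codes).keys then ['1'] else ['0']) := by
        simp [hi]
      have hrhs2 : ((List.range 256).map (fun j =>
            if pvSym j ∈ (pvD codes).keys then
              pvBytes.getD ((((pvD codes).getD (pvSym j) []).length : Int)) []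
                ++ (pvD codes).getD (pvSym j) []
            else []))[i]?
          = some (if pvSym i ∈ (pvD codes).keys then
              pvBytes.getD ((((pvD codes).getD (pvSym i) []).length : Int)) []
                ++ (pvD codes).getD (pvSym i) []
            else []) := by
        simp [hi]
      rw [hrhs1, hrhs2]
      by_cases hex : ∃ p ∈ codes, pvHit p i
      · obtain ⟨p, hp, h8, hb, hparse⟩ := hex
        have hksym : p.1.toList = pvSym i := by
          rw [← hparse]; exact (pvParse_sym _ h8 hb).1.symm
        have hhit := pvFoldB_hit codes p.1 p.2 (by simpa using hp) hndL h8 hb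
          (List.replicate 256 ['0']) (List.replicate 256 [])
          (List.length_replicate) (List.length_replicate)
        rw [hparse] at hhit
        have hmem : pvSym i ∈ (pvD codes).keys := by
          rw [hkeys, ← hksym]
          exact List.mem_map.mpr ⟨p, hp, rfl⟩
        have hcode : (pvD codes).getD (pvSym i) [] = p.2.toList := by
          apply PySem.Dict.getD_of_mem_items _ _ hndK
          rw [hitems, ← hksym]
          exact List.mem_map.mpr ⟨p, hp, rfl⟩
        have hle : p.2.toList.length ≤ 255 := hlen p hp ⟨h8, hb⟩
        refine ⟨?_, ?_⟩
        · rw [hhit.1, if_pos hmem]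
        · rw [hhit.2, if_pos hmem, hcode, pvBytes_getD _ (by omega)]
      · have hmiss := pvFoldB_miss codes i (fun p hp hh => hex ⟨p, hp, hh⟩)
          (List.replicate 256 ['0']) (List.replicate 256 [])
        have hnmem : pvSym i ∉ (pvD codes).keys := by
          rw [hkeys]
          intro hm
          obtain ⟨p, hp, hpk⟩ := List.mem_map.mp hm
          obtain ⟨hl8, hbits, hps⟩ := pvSym_spec i hi
          exact hex ⟨p, hp, by rw [hpk]; exact hl8, by rw [hpk]; exact hbits, by rw [hpk]; exact hps⟩
        refine ⟨?_, ?_⟩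
        · rw [hmiss.1, if_neg hnmem, List.getElem?_replicate, if_pos hi]
        · rw [hmiss.2, if_neg hnmem, List.getElem?_replicate, if_pos hi]
    · have hf := pvFoldB_len codes (List.replicate 256 ['0']) (List.replicate 256 [])
      refine ⟨?_, ?_⟩
      · rw [List.getElem?_eq_none (by rw [hf.1, List.length_replicate]; omega),
            List.getElem?_eq_none (by rw [List.length_map, List.length_range]; omega)]
      · rw [List.getElem?_eq_none (by rw [hf.2, List.length_replicate]; omega),
            List.getElem?_eq_none (by rw [List.length_map, List.length_range]; omega)]
  exact ⟨List.ext_getElem? (fun i => (main i).1), List.ext_getElem? (fun i => (main i).2)⟩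

-- ===== VERDICT (by name: the statement is the Claim_ definition above) =====
lemma pvAB (codes : List (String × String))
    (hnd : (codes.map Prod.fst).Nodup)
    (hlen : ∀ p ∈ codes, (p.1.toList.length = 8 ∧ ∀ c ∈ p.1.toList, c = '0' ∨ c = '1') →
      p.2.toList.length ≤ 255) :
    gen_header_py codes = gen_header_py_alt codes := by
  obtain ⟨e1, e2⟩ := pvTables codes hnd hlen
  rw [pvA_eq, pvB_eq, pvBytes_values]
  simp only []
  rw [pvFoldA ((pvD codes).keys)
    (fun s => pvBytes.getD ((((pvD codes).getD s []).length : Int)) [])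
    (fun s => (pvD codes).getD s []) ((List.range 256).map pvSym) [] []]
  rw [List.map_map, List.map_map, e1, e2]
  rfl

theorem gen_header_py_spec : Claim_equal_gen_header_py :=
  fun codes _ hpre => pvAB codes hpre.1 hpre.2
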